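-- pv_equiv track=rewrite | github.com/cihanayindi/DekoAsistanAI | backend/services/response_processor.py | _create_product_suggestion_text
-- ===== SOURCE A (Python) =====
-- from typing import Dict, Any, List, Optional
--
-- def _create_product_suggestion_text(products: List[Dict[str, str]]) -> str:
--     """Create product suggestion text from products list."""
--     if not products:
--         return "Ürün önerileri mevcut değil."
--
--     # Group by category
--     categories = {}
--     for product in products:
--         category = product.get('category', 'Genel')
--         if category not in categories:
--             categories[category] = []
--         categories[category].append(product)
--
--     # Build text
--     text_parts = []
--     for category, category_products in categories.items():
--         text_parts.append(f"- {category}")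
--         for product in category_products:
--             name = product.get('name', 'Ürün')
--             desc = product.get('description', 'Açıklama yok')
--             text_parts.append(f"  • {name} - {desc}")
--         text_parts.append("")
--
--     return "\n".join(text_parts).strip()
-- ===== SOURCE B (Python) =====
-- from typing import Dict, Any, List, Optional
--
-- def _create_product_suggestion_text(products: List[Dict[str, str]]) -> str:
--     """Create product suggestion text from products list (rescan-per-category version)."""
--     if not products:
--         return "Ürün önerileri mevcut değil."
--
--     # Distinct categories in first-seen order, then one filtered rescan per category.
--     cats = list(dict.fromkeys(p.get('category', 'Genel') for p in products))
--     lines = [line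
--              for c in cats
--              for line in (["- " + c]
--                           + [f"  • {p.get('name', 'Ürün')} - {p.get('description', 'Açıklama yok')}"
--                              for p in products if p.get('category', 'Genel') == c]
--                           + [""])]
--     return "\n".join(lines).strip()
-- ===== Notes on version B (the rewrite author's own statement) =====
-- stated objective: alternative
-- what changed: Replaces the maintained grouping dict with distinct categories computed once via dict.fromkeys and one filtered rescan of the product list per category, assembled by a flat comprehension.
import Mathlib
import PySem

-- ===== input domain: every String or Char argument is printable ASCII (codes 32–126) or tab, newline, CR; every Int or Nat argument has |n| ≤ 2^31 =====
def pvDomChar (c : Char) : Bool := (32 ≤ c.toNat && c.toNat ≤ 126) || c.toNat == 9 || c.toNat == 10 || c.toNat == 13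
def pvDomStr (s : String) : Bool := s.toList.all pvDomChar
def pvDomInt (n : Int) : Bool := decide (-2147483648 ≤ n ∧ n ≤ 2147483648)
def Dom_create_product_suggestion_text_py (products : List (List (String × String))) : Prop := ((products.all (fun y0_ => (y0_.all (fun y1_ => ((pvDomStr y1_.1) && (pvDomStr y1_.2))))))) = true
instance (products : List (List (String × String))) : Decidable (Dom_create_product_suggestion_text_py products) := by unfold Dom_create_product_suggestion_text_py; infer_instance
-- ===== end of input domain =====

-- B replaces A's maintained grouping dict with first-seen distinct categories plus one
-- filtered rescan of the product list per category (objective: alternative decomposition).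

-- ===== PORT A =====
-- product.get(key, dflt) on the association-list dict
def pvAGet (p : List (String × String)) (k dflt : String) : String :=
  (PySem.Dict.mk p).getD k dflt

def create_product_suggestion_text_py (products : List (List (String × String))) : String :=
  if products = [] then "Ürün önerileri mevcut değil."
  else
    -- group by category: 'if category not in categories: categories[category] = []; categories[category].append(product)'
    let categories := products.foldl (fun d product =>
      let category := pvAGet product "category" "Genel"
      let d1 := if d.contains category then d
                else d.insert category ([] : List (List (String × String)))
      d1.modify category [] (fun l => l ++ [product])) PySem.Dict.empty
    -- build text_parts
    let text_parts := categories.items.foldl (fun acc cp =>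
      let acc1 := acc ++ ["- " ++ cp.1]
      let acc2 := cp.2.foldl (fun a product =>
        a ++ ["  • " ++ pvAGet product "name" "Ürün" ++ " - " ++ pvAGet product "description" "Açıklama yok"]) acc1
      acc2 ++ [""]) ([] : List String)
    PySem.Str.strip (PySem.Str.join "\n" text_parts)

-- ===== PORT B =====
def pvBCat (p : List (String × String)) : String :=
  (PySem.Dict.mk p).getD "category" "Genel"

def pvBRow (p : List (String × String)) : String :=
  "  • " ++ (PySem.Dict.mk p).getD "name" "Ürün" ++ " - " ++ (PySem.Dict.mk p).getD "description" "Açıklama yok"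

def create_product_suggestion_text_py_alt (products : List (List (String × String))) : String :=
  if products = [] then "Ürün önerileri mevcut değil."
  else
    let cats := PySem.List.dedup (products.map pvBCat)   -- list(dict.fromkeys(...)), first-seen order
    let lines := cats.flatMap (fun c =>
      ["- " ++ c]
      ++ ((products.filter (fun p => pvBCat p == c)).map pvBRow)
      ++ [""])
    PySem.Str.strip (PySem.Str.join "\n" lines)

-- ===== PRECONDITION & SPEC =====
def Spec_create_product_suggestion_text_py (products : List (List (String × String))) (out : String) : Prop := out = create_product_suggestion_text_py_alt products
instance (products : List (List (String × String))) (out : String) : Decidable (Spec_create_product_suggestion_text_py products out) := by unfold Spec_create_product_suggestion_text_py; infer_instance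

-- ===== CLAIM (what is proved, stated in full; the proofs are below) =====
def Claim_equal_create_product_suggestion_text_py : Prop := ∀ (products : List (List (String × String))), Dom_create_product_suggestion_text_py products → Spec_create_product_suggestion_text_py products (create_product_suggestion_text_py products)

-- ===== LEMMAS AND PROOFS =====

-- A's "setdefault-then-append" step is Dict.modify with default []
theorem pvStepA_eq_modify (d : PySem.Dict String (List (List (String × String))))
    (c : String) (p : List (String × String)) :
    (if d.contains c then d else d.insert c ([] : List (List (String × String)))).modify c []
        (fun l => l ++ [p])
      = d.modify c [] (fun l => l ++ [p]) := by
  by_cases h : d.contains c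
  · simp [h]
  · rw [if_neg h]
    rw [PySem.Dict.modify, PySem.Dict.modify, PySem.Dict.getD_insert_self,
      PySem.Dict.insert_insert_self,
      PySem.Dict.getD_of_not_contains d [] (by simpa using h)]

-- A's grouping dict, characterised: its items are the first-seen categories paired with
-- the products of that category in order.
theorem pvGroup_items (products : List (List (String × String))) :
    (products.foldl (fun d product =>
      let category := pvAGet product "category" "Genel"
      let d1 := if d.contains category then d
                else d.insert category ([] : List (List (String × String)))
      d1.modify category [] (fun l => l ++ [product])) PySem.Dict.empty).items
    = (PySem.List.dedup (products.map pvBCat)).map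
        (fun c => (c, products.filter (fun p => pvBCat p == c))) := by
  have hstep : (products.foldl (fun d product =>
      let category := pvAGet product "category" "Genel"
      let d1 := if d.contains category then d
                else d.insert category ([] : List (List (String × String)))
      d1.modify category [] (fun l => l ++ [product])) PySem.Dict.empty)
    = products.foldl (fun d product =>
        d.modify (pvBCat product) [] (fun l => l ++ [product])) PySem.Dict.empty := by
    apply PySem.List.foldl_congr_mem
    intro acc x _
    simp only [pvAGet, pvBCat]
    exact pvStepA_eq_modify acc (pvAGet x "category" "Genel") x
  rw [hstep]
  set D := products.foldl (fun d product =>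
      d.modify (pvBCat product) [] (fun l => l ++ [product])) PySem.Dict.empty with hD
  have hkeys : D.keys = PySem.List.dedup (products.map pvBCat) := by
    rw [hD, PySem.Dict.keys_foldl_modify_key products pvBCat []
      (fun _ product => fun l => l ++ [product]) PySem.Dict.empty]
    simp [PySem.Dict.keys_empty, PySem.Set.update_nil_left, PySem.List.dedup_eq_ofList]
  have hnd : D.keys.Nodup := by
    rw [hkeys, PySem.List.dedup_eq_ofList]
    exact PySem.Set.nodup_ofList (products.map pvBCat)
  have hget : ∀ c, D.getD c [] = products.filter (fun p => pvBCat p == c) := by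
    intro c
    have : D = (products.map (fun p => (pvBCat p, p))).foldl
        (fun d q => d.modify q.1 [] (fun l => l ++ [q.2])) PySem.Dict.empty := by
      rw [hD, List.foldl_map]
    rw [this, PySem.Dict.getD_foldl_modify_append]
    simp [PySem.Dict.getD_empty, List.filter_map, Function.comp_def]
  rw [PySem.Dict.items_eq_map_keys D hnd [], hkeys]
  exact List.map_congr_left (fun c _ => by rw [hget c])

-- ===== VERDICT (by name: the statement is the Claim_ definition above) =====
theorem create_product_suggestion_text_py_spec : Claim_equal_create_product_suggestion_text_py := by
  intro products _
  unfold Spec_create_product_suggestion_text_py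
  unfold create_product_suggestion_text_py create_product_suggestion_text_py_alt
  by_cases h : products = []
  · simp [h]
  · simp only [h, if_false]
    rw [pvGroup_items]
    congr 1
    have hbody : (fun (acc : List String) (cp : String × List (List (String × String))) =>
        (cp.2.foldl (fun a product =>
          a ++ ["  • " ++ pvAGet product "name" "Ürün" ++ " - " ++ pvAGet product "description" "Açıklama yok"]) (acc ++ ["- " ++ cp.1])) ++ [""])
      = fun acc cp => acc ++ (["- " ++ cp.1] ++ cp.2.map pvBRow ++ [""]) := by
      funext acc cp
      rw [PySem.List.foldl_append_singleton_eq_map]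
      simp [pvBRow, pvAGet, List.append_assoc]
    rw [hbody, PySem.List.foldl_append_eq_flatMap, List.flatMap_map]
    simp
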